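-- pv_equiv track=rewrite | github.com/yuju-lee/algorithm-study | wk2/day4/day4-7.py | findratio
-- ===== SOURCE A (Python) =====
-- def findratio(x, y):
--     left = 1
--     right = x
--
--     ratio = int((100*y)//x)
--     ans = 0
--     if 99 <= ratio:
--         return -1
--     else:
--         while left <= right:
--             mid = (left+right)//2
--             newratio = (y+mid) * 100 // (x+mid)
--             if  ratio < newratio:
--                 ans = mid
--                 right = mid-1
--             else:
--                 left = mid+1
--
--
--     return ans
-- ===== SOURCE B (Python) =====
-- def findratio(x, y):
--     ratio = 100 * y // x
--     if ratio >= 99: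
--         return -1
--     need = -(-((ratio + 1) * x - 100 * y) // (99 - ratio))
--     mid = max(1, need)
--     return mid if mid <= x else 0
-- ===== Notes on version B (the rewrite author's own statement) =====
-- stated objective: simpler
-- what changed: Replaces the binary search over [1,x] with a closed-form ceiling-division formula: the minimal qualifying increment is max(1, ceil(((ratio+1)*x - 100*y)/(99-ratio))), returned directly (0 if it exceeds x).
-- outside the precondition, e.g. on findratio(0, 5): A raises ZeroDivisionError, B raises ZeroDivisionError
import Mathlib
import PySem

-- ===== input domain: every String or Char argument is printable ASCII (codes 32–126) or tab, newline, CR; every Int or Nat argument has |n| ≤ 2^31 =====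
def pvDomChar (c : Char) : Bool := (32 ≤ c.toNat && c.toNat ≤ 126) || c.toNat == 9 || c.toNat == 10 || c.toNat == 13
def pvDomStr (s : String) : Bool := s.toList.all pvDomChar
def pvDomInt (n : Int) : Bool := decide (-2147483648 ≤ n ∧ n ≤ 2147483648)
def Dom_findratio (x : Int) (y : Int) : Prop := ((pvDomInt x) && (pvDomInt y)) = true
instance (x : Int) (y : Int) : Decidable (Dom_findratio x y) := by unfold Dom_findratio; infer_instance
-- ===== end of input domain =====

-- B replaces A's binary search over [1, x] with a closed-form ceiling-division formula
-- for the minimal qualifying increment; objective: simpler (no loop at all).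

-- ===== PORT A =====
-- the while loop of A, step for step: state (left, right, ans)
def pvBsA (x y ratio : Int) (left right ans : Int) : Int :=
  if h : left ≤ right then
    let mid := PySem.Int.floordiv (left + right) 2
    let newratio := PySem.Int.floordiv ((y + mid) * 100) (x + mid)
    if ratio < newratio then pvBsA x y ratio left (mid - 1) mid
    else pvBsA x y ratio (mid + 1) right ans
  else ans
termination_by (right + 1 - left).toNat
decreasing_by
  · have hb := PySem.Int.floordiv_two_mid_bounds h; omega
  · have hb := PySem.Int.floordiv_two_mid_bounds h; omega

def findratio (x : Int) (y : Int) : Int :=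
  let ratio := PySem.Int.floordiv (100 * y) x
  if 99 ≤ ratio then -1
  else pvBsA x y ratio 1 x 0

-- ===== PORT B =====
-- Source B, step for step: ceiling division written as -(-n // d), then max(1, need)
def findratio_alt (x : Int) (y : Int) : Int :=
  let ratio := PySem.Int.floordiv (100 * y) x
  if 99 ≤ ratio then -1
  else
    let need := -(PySem.Int.floordiv (-((ratio + 1) * x - 100 * y)) (99 - ratio))
    let mid := max 1 need
    if mid ≤ x then mid else 0

-- ===== PRECONDITION & SPEC =====
-- Pre_ excludes only x = 0, where Python A raises ZeroDivisionError (B raises there too).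
def Pre_findratio (x : Int) (y : Int) : Prop := x ≠ 0
instance (x : Int) (_y : Int) : Decidable (Pre_findratio x _y) := by unfold Pre_findratio; infer_instance
def pvWitness_findratio : Int × Int := (10, 5)

def Spec_findratio (x : Int) (y : Int) (out : Int) : Prop := out = findratio_alt x y
instance (x : Int) (y : Int) (out : Int) : Decidable (Spec_findratio x y out) := by unfold Spec_findratio; infer_instance

-- ===== CLAIM (what is proved, stated in full; the proofs are below) =====
def Claim_equal_findratio : Prop := ∀ (x : Int) (y : Int), Dom_findratio x y → Pre_findratio x y → Spec_findratio x y (findratio x y)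

-- ===== LEMMAS AND PROOFS =====

-- the qualifying predicate of the search
def pvP (x y ratio : Int) (m : Int) : Bool :=
  decide (ratio < PySem.Int.floordiv ((y + m) * 100) (x + m))

-- if the old ratio is below 99 (and x ≥ 1), then y < x
lemma pv_y_lt_x {x y : Int} (hx : 1 ≤ x)
    (hr : ¬ 99 ≤ PySem.Int.floordiv (100 * y) x) : y < x := by
  by_contra hge
  exact hr ((PySem.Int.le_floordiv_iff_mul_le (by omega)).2 (by nlinarith))

-- for x ≥ 1, ratio < 99, m ≥ 1: the predicate holds iff m reaches the ceiling threshold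
lemma pvP_iff_need {x y ratio : Int} (hx : 1 ≤ x)
    (hr : ¬ (99 : Int) ≤ ratio) {m : Int} (hm : 1 ≤ m) :
    pvP x y ratio m = true ↔
      -(PySem.Int.floordiv (-((ratio + 1) * x - 100 * y)) (99 - ratio)) ≤ m := by
  have hd : (0 : Int) < 99 - ratio := by omega
  have hxm : (0 : Int) < x + m := by omega
  constructor
  · intro hp
    have hp' : ratio + 1 ≤ PySem.Int.floordiv ((y + m) * 100) (x + m) := by
      simp only [pvP, decide_eq_true_eq] at hp; omega
    have h1 : (ratio + 1) * (x + m) ≤ (y + m) * 100 :=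
      (PySem.Int.le_floordiv_iff_mul_le hxm).1 hp'
    have h2 : (-m) * (99 - ratio) ≤ -((ratio + 1) * x - 100 * y) := by nlinarith
    have := (PySem.Int.le_floordiv_iff_mul_le hd).2 h2
    omega
  · intro hn
    have h2 : (-m) ≤ PySem.Int.floordiv (-((ratio + 1) * x - 100 * y)) (99 - ratio) := by omega
    have h3 : (-m) * (99 - ratio) ≤ -((ratio + 1) * x - 100 * y) :=
      (PySem.Int.le_floordiv_iff_mul_le hd).1 h2
    have h4 : (ratio + 1) * (x + m) ≤ (y + m) * 100 := by nlinarith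
    have := (PySem.Int.le_floordiv_iff_mul_le hxm).2 h4
    simp only [pvP, decide_eq_true_eq]
    omega

-- monotonicity of the predicate in m
lemma pvP_mono {x y ratio : Int} (hx : 1 ≤ x) (hyx : y < x)
    {a b : Int} (ha : 1 ≤ a) (hab : a ≤ b) (hpa : pvP x y ratio a = true) :
    pvP x y ratio b = true := by
  unfold pvP at *
  have hxa : (0 : Int) < x + a := by omega
  have hxb : (0 : Int) < x + b := by omega
  have hpa' : ratio < PySem.Int.floordiv ((y + a) * 100) (x + a) := by
    simpa using hpa
  set k := PySem.Int.floordiv ((y + a) * 100) (x + a) with hk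
  have h1 : k * (x + a) ≤ (y + a) * 100 :=
    (PySem.Int.le_floordiv_iff_mul_le hxa).1 (le_refl k)
  have h2 : k ≤ PySem.Int.floordiv ((y + b) * 100) (x + b) := by
    refine (PySem.Int.le_floordiv_iff_mul_le hxb).2 ?_
    nlinarith [mul_le_mul_of_nonneg_right h1 (le_of_lt hxb)]
  simp only [decide_eq_true_eq]
  omega

-- the binary search returns the first m in [1, x] with pvP, else 0 — stated against
-- an abstract target t: if t is the least qualifying index (or none exists), A finds it
lemma pv_bsA_correct (x y ratio : Int) (hx : 1 ≤ x) (hyx : y < x) (t : Int)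
    (ht1 : 1 ≤ t) (htP : t ≤ x → pvP x y ratio t = true)
    (htmin : ∀ m, 1 ≤ m → m < t → pvP x y ratio m = false) :
    ∀ (n : Nat) (left right ans : Int), (right + 1 - left).toNat = n →
      1 ≤ left → left ≤ right + 1 → right ≤ x →
      (∀ m, 1 ≤ m → m < left → pvP x y ratio m = false) →
      ((ans = 0 ∧ ∀ m, right < m → m ≤ x → pvP x y ratio m = false) ∨
        (ans = right + 1 ∧ pvP x y ratio ans = true ∧ ans ≤ x)) →
      pvBsA x y ratio left right ans = (if t ≤ x then t else 0) := by
  intro n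
  induction n using Nat.strong_induction_on with
  | _ n ih =>
    intro left right ans hn h1l hlr hrx hleft hans
    rw [pvBsA]
    by_cases h : left ≤ right
    · rw [dif_pos h]
      have hb := PySem.Int.floordiv_two_mid_bounds h
      set mid := PySem.Int.floordiv (left + right) 2 with hmid
      by_cases hp : ratio < PySem.Int.floordiv ((y + mid) * 100) (x + mid)
      · rw [if_pos hp]
        exact ih (mid - 1 + 1 - left).toNat (by omega) left (mid - 1) mid rfl
          h1l (by omega) (by omega) hleft
          (Or.inr ⟨by omega, by simp [pvP, hp], by omega⟩)
      · rw [if_neg hp]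
        have hPmid : pvP x y ratio mid = false := by simp [pvP]; omega
        refine ih (right + 1 - (mid + 1)).toNat (by omega) (mid + 1) right ans rfl
          (by omega) (by omega) hrx ?_ hans
        intro m hm1 hmlt
        by_cases hml : m < left
        · exact hleft m hm1 hml
        · by_cases hPm : pvP x y ratio m = true
          · have := pvP_mono hx hyx hm1 (by omega : m ≤ mid) hPm
            simp [this] at hPmid
          · simpa using hPm
    · rw [dif_neg h]
      have hleq : left = right + 1 := by omega
      rcases hans with ⟨h0, hafter⟩ | ⟨hansr, hPans, hansx⟩
      · -- no qualifying m exists: t must exceed x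
        have htgt : ¬ t ≤ x := by
          intro htx
          have hPt := htP htx
          by_cases htl : t < left
          · simp [hleft t ht1 htl] at hPt
          · simp [hafter t (by omega) htx] at hPt
        rw [h0, if_neg htgt]
      · -- ans is the least qualifying index: ans = t
        have h1a : 1 ≤ ans := by omega
        have htans : t = ans := by
          by_cases hlt : t < ans
          · have := hleft t ht1 (by omega)
            have := htP (by omega)
            simp_all
          · by_cases hgt : ans < t
            · simp [htmin ans h1a hgt] at hPans
            · omega
        have htx : t ≤ x := htans ▸ hansx
        rw [if_pos htx]
        omega

-- ===== VERDICT (by name: the statement is the Claim_ definition above) =====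
theorem findratio_spec : Claim_equal_findratio := by
  intro x y _ hpre
  unfold Pre_findratio at hpre
  unfold Spec_findratio findratio findratio_alt
  simp only []
  by_cases hr : 99 ≤ PySem.Int.floordiv (100 * y) x
  · rw [if_pos hr, if_pos hr]
  · rw [if_neg hr, if_neg hr]
    set ratio := PySem.Int.floordiv (100 * y) x with hratio
    set need := -(PySem.Int.floordiv (-((ratio + 1) * x - 100 * y)) (99 - ratio)) with hneed
    by_cases hx : 1 ≤ x
    · have hyx := pv_y_lt_x hx hr
      have ht1 : 1 ≤ max 1 need := le_max_left _ _
      refine pv_bsA_correct x y ratio hx hyx (max 1 need) ht1 ?_ ?_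
        x.toNat 1 x 0 (by omega) le_rfl (by omega) le_rfl
        (fun m h1 h2 => absurd (h1.trans_lt h2) (lt_irrefl 1))
        (Or.inl ⟨rfl, fun m h1 h2 => absurd (h1.trans_le h2) (lt_irrefl x)⟩)
      · intro hmx
        exact (pvP_iff_need hx hr ht1).2 (le_max_right _ _)
      · intro m hm1 hmlt
        by_contra hP
        have hP' : pvP x y ratio m = true := by
          cases hPb : pvP x y ratio m with
          | false => exact absurd hPb hP
          | true => rfl
        have hle := (pvP_iff_need hx hr hm1).1 hP'
        rw [← hneed] at hle
        omega
    · -- x < 0 (x ≠ 0): A's loop never runs (1 > x) and B's mid = max 1 need > x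
      rw [pvBsA, dif_neg (by omega : ¬ (1:Int) ≤ x),
        if_neg (by have := le_max_left 1 need; omega)]
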